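-- pv_equiv track=rewrite | github.com/XiangyuG/FlexTbl | iptable_gen/rule_gen.py | code_gen
-- ===== SOURCE A (Python) =====
-- def code_gen(iptable_rules):
--     out_str = ""
--     out_str += "(define (spec srcip dstip proto sport dport)\n"
--
--     for r in iptable_rules:
--         out_str += "  (if (and "
--         sip, dip, proto, sport, dport = r
--
--         if sip is not None:
--             out_str += f"(bveq srcip (bv #x{sip:08x} 32))"
--         if dip is not None:
--             out_str += f"(bveq dstip (bv #x{dip:08x} 32))"
--         if proto is not None:
--             out_str += f"(bveq proto (bv #x{proto:02x} 8))"
--         if sport is not None: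
--             out_str += f"(bveq sport (bv #x{sport:04x} 16))"
--         if dport is not None:
--             out_str += f"(bveq dport (bv #x{dport:04x} 16))"
--         out_str += ") (bv 1 8)\n"
--     out_str += "(bv 0 8)"
--     for r in iptable_rules:
--         out_str += ")"
--     out_str += ")"
--     return out_str
-- ===== SOURCE B (Python) =====
-- def code_gen(iptable_rules):
--     # Table-driven condition builder + back-to-front nesting: the per-field code
--     # lives in one data table instead of five copied if-blocks, and each rule's
--     # closing paren is interleaved as the nested (if ...) is wrapped around the
--     # accumulator, so A's second paren-closing loop disappears.
--     def cond(r):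
--         fields = zip(("srcip", "dstip", "proto", "sport", "dport"),
--                      (8, 8, 2, 4, 4), ("32", "32", "8", "16", "16"), r)
--         return "".join(f"(bveq {name} (bv #x{v:0{w}x} {bits}))"
--                        for name, w, bits, v in fields if v is not None)
--     acc = "(bv 0 8)"
--     for r in reversed(iptable_rules):
--         acc = "  (if (and " + cond(r) + ") (bv 1 8)\n" + acc + ")"
--     return "(define (spec srcip dstip proto sport dport)\n" + acc + ")"
-- ===== Notes on version B (the rewrite author's own statement) =====
-- stated objective: alternative
-- what changed: Replaces A's five copied if-blocks and two sequential loops (openers, then all closing parens) with a table-driven per-field condition builder plus a single back-to-front pass that wraps each rule's (if ...) and its own closing paren around the base case.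
import Mathlib
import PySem

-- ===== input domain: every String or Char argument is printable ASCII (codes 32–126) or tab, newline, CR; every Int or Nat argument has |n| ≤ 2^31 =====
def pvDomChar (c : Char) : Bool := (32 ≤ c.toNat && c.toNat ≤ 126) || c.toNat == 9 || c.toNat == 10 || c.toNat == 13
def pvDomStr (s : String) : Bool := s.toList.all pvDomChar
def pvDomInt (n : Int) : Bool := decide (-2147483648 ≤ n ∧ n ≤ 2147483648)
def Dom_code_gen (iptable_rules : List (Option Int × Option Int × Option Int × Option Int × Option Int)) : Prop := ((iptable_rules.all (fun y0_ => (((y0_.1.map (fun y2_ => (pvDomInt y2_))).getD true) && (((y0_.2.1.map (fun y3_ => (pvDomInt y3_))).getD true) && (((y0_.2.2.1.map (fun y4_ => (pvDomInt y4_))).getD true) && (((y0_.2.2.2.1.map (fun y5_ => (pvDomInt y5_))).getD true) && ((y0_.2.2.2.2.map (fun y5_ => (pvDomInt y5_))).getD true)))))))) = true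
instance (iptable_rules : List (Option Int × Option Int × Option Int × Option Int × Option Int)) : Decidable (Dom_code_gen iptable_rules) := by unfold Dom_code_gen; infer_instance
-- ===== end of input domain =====

-- B replaces A's five copied if-blocks and two sequential loops with a table-driven
-- per-field condition builder plus one back-to-front wrapping pass that interleaves
-- each rule's closing paren; same return value. Strings are List Char, converted once.

-- Shared formatting helper: Python f"{n:0{w}x}" (lowercase hex, zero-padded to total
-- width w, '-' counted in the width for negative n).
def pvHexDigit (d : Nat) : Char := if d < 10 then Char.ofNat (48 + d) else Char.ofNat (87 + d)

def pvNatHexList (n : Nat) : List Char :=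
  if _h : n = 0 then [] else pvNatHexList (n / 16) ++ [pvHexDigit (n % 16)]
  decreasing_by exact Nat.div_lt_self (Nat.pos_of_ne_zero _h) (by norm_num)

def pvHexPad (n : Int) (w : Nat) : List Char :=
  let core := if n.natAbs = 0 then ['0'] else pvNatHexList n.natAbs
  if n < 0 then '-' :: (List.replicate (w - 1 - core.length) '0' ++ core)
  else List.replicate (w - core.length) '0' ++ core

-- ===== PORT A =====
-- the body of A's first for-loop (out_str += opener, five conditional +=, += tail)
def pvStepA (s : List Char) (r : Option Int × Option Int × Option Int × Option Int × Option Int) : List Char :=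
  let s := s ++ "  (if (and ".toList
  let (sip, dip, proto, sport, dport) := r
  let s := match sip with
    | none => s
    | some v => s ++ "(bveq srcip (bv #x".toList ++ pvHexPad v 8 ++ " 32))".toList
  let s := match dip with
    | none => s
    | some v => s ++ "(bveq dstip (bv #x".toList ++ pvHexPad v 8 ++ " 32))".toList
  let s := match proto with
    | none => s
    | some v => s ++ "(bveq proto (bv #x".toList ++ pvHexPad v 2 ++ " 8))".toList
  let s := match sport with
    | none => s
    | some v => s ++ "(bveq sport (bv #x".toList ++ pvHexPad v 4 ++ " 16))".toList
  let s := match dport with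
    | none => s
    | some v => s ++ "(bveq dport (bv #x".toList ++ pvHexPad v 4 ++ " 16))".toList
  s ++ ") (bv 1 8)\n".toList

def code_gen (iptable_rules : List (Option Int × Option Int × Option Int × Option Int × Option Int)) : String :=
  let out := "(define (spec srcip dstip proto sport dport)\n".toList
  let out := iptable_rules.foldl pvStepA out
  let out := out ++ "(bv 0 8)".toList
  let out := iptable_rules.foldl (fun s _ => s ++ [')']) out
  String.ofList (out ++ [')'])

-- ===== PORT B =====
-- Source B's field table: (name, hex width, bit-width string) per tuple component
def pvFields : List (List Char × Nat × List Char) :=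
  [("srcip".toList, 8, "32".toList), ("dstip".toList, 8, "32".toList),
   ("proto".toList, 2, "8".toList), ("sport".toList, 4, "16".toList),
   ("dport".toList, 4, "16".toList)]

-- Source B's cond: join one (bveq ...) fragment per non-None field, driven by the table
def pvFrag (f : List Char × Nat × List Char) : Option Int → List Char
  | none => []
  | some x => "(bveq ".toList ++ f.1 ++ " (bv #x".toList ++ pvHexPad x f.2.1
                ++ (' ' :: f.2.2) ++ "))".toList

def pvCond (r : Option Int × Option Int × Option Int × Option Int × Option Int) : List Char :=
  ((pvFields.zip [r.1, r.2.1, r.2.2.1, r.2.2.2.1, r.2.2.2.2]).flatMap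
    (fun fv => pvFrag fv.1 fv.2))

def code_gen_alt (iptable_rules : List (Option Int × Option Int × Option Int × Option Int × Option Int)) : String :=
  let acc := iptable_rules.reverse.foldl
    (fun acc r => "  (if (and ".toList ++ pvCond r ++ ") (bv 1 8)\n".toList ++ acc ++ [')'])
    "(bv 0 8)".toList
  String.ofList ("(define (spec srcip dstip proto sport dport)\n".toList ++ acc ++ [')'])

-- ===== PRECONDITION & SPEC =====
def Spec_code_gen (iptable_rules : List (Option Int × Option Int × Option Int × Option Int × Option Int)) (out : String) : Prop := out = code_gen_alt iptable_rules
instance (iptable_rules : List (Option Int × Option Int × Option Int × Option Int × Option Int)) (out : String) : Decidable (Spec_code_gen iptable_rules out) := by unfold Spec_code_gen; infer_instance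

-- ===== CLAIM (what is proved, stated in full; the proofs are below) =====
def Claim_equal_code_gen : Prop := ∀ (iptable_rules : List (Option Int × Option Int × Option Int × Option Int × Option Int)), Dom_code_gen iptable_rules → Spec_code_gen iptable_rules (code_gen iptable_rules)

-- ===== LEMMAS AND PROOFS =====

-- the string A's loop body appends for one rule equals B's per-rule fragment
def pvRuleStr (r : Option Int × Option Int × Option Int × Option Int × Option Int) : List Char :=
  "  (if (and ".toList ++ pvCond r ++ ") (bv 1 8)\n".toList

lemma pvStepA_eq : pvStepA = fun s r => s ++ pvRuleStr r := by
  funext s r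
  obtain ⟨sip, dip, proto, sport, dport⟩ := r
  cases sip <;> cases dip <;> cases proto <;> cases sport <;> cases dport <;>
    simp [pvStepA, pvRuleStr, pvCond, pvFields, pvFrag]

lemma pv_close {α : Type} (rs : List α) :
    rs.flatMap (fun _ => ([')'] : List Char)) = List.replicate rs.length ')' := by
  induction rs with
  | nil => simp
  | cons r rs ih => simp [ih, List.replicate_succ]

lemma pv_loopB (rules : List (Option Int × Option Int × Option Int × Option Int × Option Int)) :
    rules.reverse.foldl
      (fun acc r => "  (if (and ".toList ++ pvCond r ++ ") (bv 1 8)\n".toList ++ acc ++ [')'])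
      "(bv 0 8)".toList
    = rules.flatMap pvRuleStr ++ "(bv 0 8)".toList ++ List.replicate rules.length ')' := by
  rw [List.foldl_reverse]
  induction rules with
  | nil => simp
  | cons r rs ih =>
      rw [List.foldr_cons, ih]
      simp only [List.flatMap_cons, List.length_cons, List.replicate_succ']
      simp [pvRuleStr, List.append_assoc]

-- ===== VERDICT (by name: the statement is the Claim_ definition above) =====
theorem code_gen_spec : Claim_equal_code_gen := by
  intro rules _
  unfold Spec_code_gen
  simp only [code_gen, code_gen_alt]
  rw [pvStepA_eq, PySem.List.foldl_append_eq_flatMap, PySem.List.foldl_append_eq_flatMap,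
    pv_close, pv_loopB]
  simp [List.append_assoc]
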